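-- pv_equiv track=rewrite | github.com/AuroraMeizhu3620/oim3640 | code/miniproject_2/p2_milestone_1.py | word_sentence
-- ===== SOURCE A (Python) =====
-- def word_sentence(text, target_word):
--     words = text.split()
--     sentences_found = []
--     current_sentence = []
--
--     for word in words:
--         current_sentence.append(word)
--
--         if word.endswith(".") or word.endswith("!") or word.endswith("?"):
--             for w in current_sentence:
--                 if w.strip(".!?,").lower() == target_word.lower():
--                     sentences_found.append(" ".join(current_sentence))
--                     break
--             current_sentence = []
--
--     return sentences_found
-- ===== SOURCE B (Python) =====
-- def word_sentence(text, target_word):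
--     words = text.split()
--     t = target_word.lower()
--     # prefix counts: pref[i] = number of matching words among words[:i]
--     pref = [0]
--     for w in words:
--         pref.append(pref[-1] + (w.strip('.!?,').lower() == t))
--     # indices of sentence-terminating words
--     ends = [i for i, w in enumerate(words) if w[-1] in '.!?']
--     result = []
--     start = 0
--     for e in ends:
--         if pref[e + 1] > pref[start]:
--             result.append(' '.join(words[start:e + 1]))
--         start = e + 1
--     return result
-- ===== Notes on version B (the rewrite author's own statement) =====
-- stated objective: alternative
-- what changed: B replaces A's fused accumulate-and-match loop by index arithmetic: it builds a prefix-count array of target matches and the list of sentence-boundary indices, then emits words[start:e+1] for each boundary e whose prefix counts differ, instead of carrying a current-sentence list and scanning it at each terminator.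
import Mathlib
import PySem

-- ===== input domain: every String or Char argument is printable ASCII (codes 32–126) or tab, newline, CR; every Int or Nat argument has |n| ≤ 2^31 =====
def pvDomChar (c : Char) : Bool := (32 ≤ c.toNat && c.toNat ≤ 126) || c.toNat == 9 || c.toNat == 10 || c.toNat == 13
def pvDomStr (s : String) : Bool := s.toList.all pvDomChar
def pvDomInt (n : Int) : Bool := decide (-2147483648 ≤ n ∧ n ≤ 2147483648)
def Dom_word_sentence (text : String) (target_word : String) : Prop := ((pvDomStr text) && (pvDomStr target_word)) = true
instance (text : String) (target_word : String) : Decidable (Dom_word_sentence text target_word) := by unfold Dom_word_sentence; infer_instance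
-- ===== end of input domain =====

-- B replaces A's fused accumulate-and-match loop by index arithmetic: a prefix-count array of
-- matching words plus the list of sentence-boundary indices, emitting words[start:e+1] per
-- boundary e whose prefix counts differ; same cost, different data structures.

-- ===== PORT A =====
-- inner 'for w in current_sentence: … break' loop, returned as 'did a word match'
def wsA_inner (cur : List String) (target_word : String) : Bool :=
  match cur with
  | [] => false
  | w :: rest =>
    if PySem.Str.lower (PySem.Str.stripChars w ".!?,") == PySem.Str.lower target_word then true
    else wsA_inner rest target_word

def wsA_loop (target_word : String) (words : List String)
    (found : List String) (cur : List String) : List String :=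
  match words with
  | [] => found
  | word :: rest =>
    let cur' := cur ++ [word]
    if PySem.Str.endswith word "." || PySem.Str.endswith word "!" || PySem.Str.endswith word "?" then
      wsA_loop target_word rest
        (if wsA_inner cur' target_word then found ++ [PySem.Str.join " " cur'] else found) []
    else
      wsA_loop target_word rest found cur'

def word_sentence (text : String) (target_word : String) : List String :=
  wsA_loop target_word (PySem.Str.split₀ text) [] []

-- ===== PORT B =====
-- Source B's per-word comparisons, named: w.strip('.!?,').lower() == t  and  w[-1] in '.!?'
def wsMatch (t w : String) : Bool :=
  PySem.Str.lower (PySem.Str.stripChars w ".!?,") == t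

def wsTerm (w : String) : Bool :=
  (PySem.Str.pyGet? w (-1)).any (fun c => ['.', '!', '?'].contains c)

-- Source B's first loop: pref.append(pref[-1] + (match))   (pref starts [0], always nonempty)
def wsB_prefLoop (t : String) (words : List String) (pref : List Int) : List Int :=
  match words with
  | [] => pref
  | w :: rest =>
      wsB_prefLoop t rest
        (pref ++ [PySem.List.pyGetD pref (-1) 0 + (if wsMatch t w then 1 else 0)])

-- Source B's comprehension: [i for i, w in enumerate(words) if w[-1] in '.!?']
def wsB_ends (words : List String) : List Int :=
  ((PySem.List.enumerate words 0).filter (fun p => wsTerm p.2)).map (·.1)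

-- Source B's emit loop over the boundary indices
def wsB_emit (words : List String) (pref : List Int) (ends : List Int)
    (start : Int) (result : List String) : List String :=
  match ends with
  | [] => result
  | e :: es =>
      wsB_emit words pref es (e + 1)
        (if PySem.List.pyGetD pref start 0 < PySem.List.pyGetD pref (e + 1) 0 then
           result ++ [PySem.Str.join " " (PySem.List.slice words (some start) (some (e + 1)))]
         else result)

def word_sentence_alt (text : String) (target_word : String) : List String :=
  let words := PySem.Str.split₀ text
  let t := PySem.Str.lower target_word
  wsB_emit words (wsB_prefLoop t words [0]) (wsB_ends words) 0 []

-- ===== PRECONDITION & SPEC =====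
def Spec_word_sentence (text : String) (target_word : String) (out : List String) : Prop := out = word_sentence_alt text target_word
instance (text : String) (target_word : String) (out : List String) : Decidable (Spec_word_sentence text target_word out) := by unfold Spec_word_sentence; infer_instance

-- ===== CLAIM (what is proved, stated in full; the proofs are below) =====
def Claim_equal_word_sentence : Prop := ∀ (text : String) (target_word : String), Dom_word_sentence text target_word → Spec_word_sentence text target_word (word_sentence text target_word)

-- ===== LEMMAS AND PROOFS =====

-- proof-layer middle form: segmentation of the word list, shared target of both directions
def wsSeg (words cur : List String) : List (List String) :=
  match words with
  | [] => []
  | w :: rest =>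
    let cur' := cur ++ [w]
    if wsTerm w then cur' :: wsSeg rest [] else wsSeg rest cur'

def wsMid (t : String) (words : List String) : List String :=
  ((wsSeg words []).filter (fun s => s.any (wsMatch t))).map (fun s => PySem.Str.join " " s)

-- ---------- A = wsMid ----------

-- A's 'word.endswith' triple test equals the last-character test wsTerm
theorem endswith_concat (xs : List Char) (x c : Char) :
    PySem.Chars.endswith (xs ++ [x]) [c] = (x == c) := by
  rw [Bool.eq_iff_iff, PySem.Chars.endswith_iff, beq_iff_eq]
  constructor
  · rintro ⟨t, ht⟩
    have := congrArg List.getLast? ht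
    simp at this
    exact this.symm
  · rintro rfl
    exact List.suffix_append xs [x]

theorem ws_cond_eq (w : String) :
    (PySem.Str.endswith w "." || PySem.Str.endswith w "!" || PySem.Str.endswith w "?")
    = wsTerm w := by
  simp only [wsTerm, PySem.Str.endswith_eq, PySem.Str.pyGet?_eq]
  induction w.toList using List.reverseRecOn with
  | nil => decide
  | append_singleton xs x ih =>
    simp [endswith_concat]
    by_cases h1 : x = '.' <;> by_cases h2 : x = '!' <;> by_cases h3 : x = '?' <;>
      simp [h1, h2, h3]

theorem ws_inner_eq (cur : List String) (tw : String) :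
    wsA_inner cur tw = cur.any (wsMatch (PySem.Str.lower tw)) := by
  induction cur with
  | nil => rfl
  | cons w rest ih =>
    simp only [wsA_inner, List.any_cons, ih, wsMatch]
    by_cases h : PySem.Str.lower (PySem.Str.stripChars w ".!?,") = PySem.Str.lower tw <;>
      simp [h]

theorem ws_main (tw : String) (words : List String) :
    ∀ (found cur : List String),
    wsA_loop tw words found cur
    = found ++ ((wsSeg words cur).filter
        (fun s => s.any (wsMatch (PySem.Str.lower tw)))).map
        (fun s => PySem.Str.join " " s) := by
  induction words with
  | nil => intro found cur; simp [wsA_loop, wsSeg]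
  | cons w rest ih =>
    intro found cur
    simp only [wsA_loop, wsSeg, ws_cond_eq]
    by_cases h : wsTerm w = true
    · simp only [h, if_true, ws_inner_eq]
      cases hb : ((cur ++ [w]).any (wsMatch (PySem.Str.lower tw))) <;> simp [hb, ih]
    · simp only [h, if_false, Bool.false_eq_true]
      exact ih found (cur ++ [w])

-- ---------- B = wsMid ----------

-- count of matching words, as an Int (the value the prefix list stores differences of)
def wsCnt (t : String) (l : List String) : Int := (l.countP (wsMatch t) : Int)

-- pure form of the prefix list built after the seed value c
def wsPrefTail (t : String) (c : Int) (words : List String) : List Int :=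
  match words with
  | [] => []
  | w :: rest =>
    (c + (if wsMatch t w then 1 else 0)) :: wsPrefTail t (c + (if wsMatch t w then 1 else 0)) rest

theorem prefLoop_eq (t : String) (words : List String) :
    ∀ (pref : List Int) (c : Int) (h : pref ≠ []), pref.getLast h = c →
    wsB_prefLoop t words pref = pref ++ wsPrefTail t c words := by
  induction words with
  | nil => intro pref c h _; simp [wsB_prefLoop, wsPrefTail]
  | cons w rest ih =>
    intro pref c h hc
    simp only [wsB_prefLoop, wsPrefTail]
    rw [PySem.List.pyGetD_neg_one pref 0 h, hc]
    rw [ih (pref ++ [c + (if wsMatch t w then 1 else 0)]) (c + (if wsMatch t w then 1 else 0))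
        (by simp) (by simp)]
    simp

theorem prefTail_getD (t : String) :
    ∀ (words : List String) (c : Int) (j : Nat), j ≤ words.length →
    (c :: wsPrefTail t c words).getD j 0 = c + wsCnt t (words.take j) := by
  intro words
  induction words with
  | nil =>
    intro c j hj
    have : j = 0 := Nat.le_zero.mp hj
    subst this; simp [wsCnt]
  | cons w rest ih =>
    intro c j hj
    cases j with
    | zero => simp [wsCnt]
    | succ jj =>
      simp only [List.length_cons] at hj
      simp only [wsPrefTail, List.getD_cons_succ, List.take_succ_cons]
      rw [ih _ jj (by omega)]
      simp only [wsCnt, List.countP_cons]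
      by_cases h : wsMatch t w = true
      · simp [h]
        ring
      · simp [h]

-- pref[j] is the number of matches among the first j words
theorem pref_getD (t : String) (full : List String) (j : Nat) (hj : j ≤ full.length) :
    PySem.List.pyGetD (wsB_prefLoop t full [0]) ((j : Nat) : Int) 0
      = wsCnt t (full.take j) := by
  rw [prefLoop_eq t full [0] 0 (by simp) (by simp)]
  rw [PySem.List.pyGetD_natCast]
  have := prefTail_getD t full 0 j hj
  simpa using this

-- ends with a general enumerate offset
def wsEndsE (s : Int) (words : List String) : List Int :=
  ((PySem.List.enumerate words s).filter (fun p => wsTerm p.2)).map (·.1)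

theorem endsE_nil_of_noTerm (s : Int) (l : List String) (h : ∀ w ∈ l, wsTerm w = false) :
    wsEndsE s l = [] := by
  unfold wsEndsE
  rw [List.filter_eq_nil_iff.mpr, List.map_nil]
  intro p hp
  rcases (PySem.List.mem_enumerate_iff _ _ _).mp hp with ⟨k, hk, rfl⟩
  simp [h _ (List.getElem_mem hk)]

theorem seg_nil_of_noTerm (l : List String) (h : ∀ w ∈ l, wsTerm w = false) :
    ∀ cur, wsSeg l cur = [] := by
  induction l with
  | nil => intro cur; rfl
  | cons w rest ih =>
    intro cur
    simp only [wsSeg, h w (by simp)]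
    exact ih (fun x hx => h x (by simp [hx])) _

theorem endsE_split (s : Int) (xs : List String) (w : String) (rest : List String)
    (hxs : ∀ x ∈ xs, wsTerm x = false) (hw : wsTerm w = true) :
    wsEndsE s (xs ++ w :: rest) = (s + xs.length) :: wsEndsE (s + xs.length + 1) rest := by
  unfold wsEndsE
  rw [PySem.List.enumerate_append, List.filter_append]
  have h1 : (PySem.List.enumerate xs s).filter (fun p => wsTerm p.2) = [] := by
    rw [List.filter_eq_nil_iff]
    intro p hp
    rcases (PySem.List.mem_enumerate_iff _ _ _).mp hp with ⟨k, hk, rfl⟩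
    simp [hxs _ (List.getElem_mem hk)]
  rw [h1, List.nil_append, PySem.List.enumerate_cons]
  simp [hw]

theorem seg_split (xs : List String) (w : String) (rest : List String)
    (hxs : ∀ x ∈ xs, wsTerm x = false) (hw : wsTerm w = true) :
    ∀ cur, wsSeg (xs ++ w :: rest) cur = (cur ++ xs ++ [w]) :: wsSeg rest [] := by
  induction xs with
  | nil => intro cur; simp [wsSeg, hw]
  | cons x xs' ih =>
    intro cur
    have hx : wsTerm x = false := hxs x (by simp)
    simp only [List.cons_append, wsSeg, hx, Bool.false_eq_true, if_false]
    rw [ih (fun y hy => hxs y (by simp [hy])) (cur ++ [x])]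
    simp

-- every word list is terminator-free or splits at its first terminator
theorem split_first (l : List String) :
    (∀ w ∈ l, wsTerm w = false) ∨
    ∃ xs w rest, l = xs ++ w :: rest ∧ (∀ x ∈ xs, wsTerm x = false) ∧ wsTerm w = true := by
  induction l with
  | nil => exact Or.inl (by simp)
  | cons a l' ih =>
    by_cases ha : wsTerm a = true
    · exact Or.inr ⟨[], a, l', by simp, by simp, ha⟩
    · rcases ih with h | ⟨xs, w, rest, rfl, hxs, hw⟩
      · exact Or.inl (by
          intro x hx
          rcases List.mem_cons.mp hx with rfl | hx
          · simpa using ha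
          · exact h x hx)
      · refine Or.inr ⟨a :: xs, w, rest, by simp, ?_, hw⟩
        intro x hx
        rcases List.mem_cons.mp hx with rfl | hx
        · simpa using ha
        · exact hxs x hx

theorem cnt_append (t : String) (l₁ l₂ : List String) :
    wsCnt t (l₁ ++ l₂) = wsCnt t l₁ + wsCnt t l₂ := by
  simp [wsCnt, List.countP_append]

theorem cnt_pos_iff_any (t : String) (l : List String) :
    (0 < wsCnt t l) ↔ l.any (wsMatch t) = true := by
  simp [wsCnt, List.any_eq_true, List.countP_pos_iff]

-- the emit loop computes wsMid of the remaining suffix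
theorem emit_eq (t : String) (full : List String) :
    ∀ (n : Nat) (suffix : List String), suffix.length = n →
    ∀ (s : Nat) (res : List String), suffix = full.drop s →
    wsB_emit full (wsB_prefLoop t full [0]) (wsEndsE (s : Int) suffix) (s : Int) res
      = res ++ ((wsSeg suffix []).filter (fun l => l.any (wsMatch t))).map
          (fun l => PySem.Str.join " " l) := by
  intro n
  induction n using Nat.strong_induction_on with
  | _ n ih =>
    intro suffix hlen s res hdrop
    rcases split_first suffix with hno | ⟨xs, w, rest, hsplit, hxs, hw⟩
    · rw [endsE_nil_of_noTerm _ _ hno, seg_nil_of_noTerm _ hno]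
      simp [wsB_emit]
    · subst hsplit
      have hs_le : s ≤ full.length := by
        by_contra hgt
        have : full.drop s = [] := List.drop_eq_nil_of_le (by omega)
        rw [this] at hdrop
        simp at hdrop
      have hfit : s + xs.length + 1 ≤ full.length := by
        have := congrArg List.length hdrop
        simp at this
        omega
      rw [endsE_split _ _ _ _ hxs hw]
      simp only [wsB_emit]
      have hcast1 : (s : Int) + (xs.length : Int) + 1 = ((s + xs.length + 1 : Nat) : Int) := by
        push_cast; ring
      -- the condition equals 'some word of the sentence matches'
      have htake : full.take (s + xs.length + 1) = full.take s ++ (xs ++ [w]) := by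
        have h1 : s + xs.length + 1 = s + (xs.length + 1) := by ring
        rw [h1, List.take_add, ← hdrop, List.take_append]
        simp
      have hcond :
          (PySem.List.pyGetD (wsB_prefLoop t full [0]) (s : Int) 0
            < PySem.List.pyGetD (wsB_prefLoop t full [0]) ((s : Int) + (xs.length : Int) + 1) 0)
          ↔ (xs ++ [w]).any (wsMatch t) = true := by
        rw [hcast1, pref_getD t full _ hfit, pref_getD t full s hs_le, htake,
          cnt_append]
        constructor
        · intro h; exact (cnt_pos_iff_any t _).mp (by omega)
        · intro h; have := (cnt_pos_iff_any t _).mpr h; omega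
      -- the slice is the sentence
      have hslice : PySem.List.slice full (some (s : Int)) (some ((s : Int) + (xs.length : Int) + 1))
          = xs ++ [w] := by
        have : (s : Int) + (xs.length : Int) + 1 = (s : Int) + ((xs.length + 1 : Nat) : Int) := by
          push_cast; ring
        rw [this, PySem.List.slice_natCast_add, ← hdrop, List.take_append]
        simp
      -- recurse
      have hdrop' : rest = full.drop (s + xs.length + 1) := by
        have : full.drop (s + xs.length + 1) = (full.drop s).drop (xs.length + 1) := by
          rw [List.drop_drop]; ring_nf
        rw [this, ← hdrop]
        simp
      have hrest_lt : rest.length < n := by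
        simp at hlen
        omega
      have hrec : ∀ r, wsB_emit full (wsB_prefLoop t full [0])
          (wsEndsE ((s + xs.length + 1 : Nat) : Int) rest) ((s + xs.length + 1 : Nat) : Int) r
          = r ++ ((wsSeg rest []).filter (fun l => l.any (wsMatch t))).map
              (fun l => PySem.Str.join " " l) :=
        fun r => ih rest.length hrest_lt rest rfl (s + xs.length + 1) r hdrop'
      rw [seg_split _ _ _ hxs hw]
      simp only [List.nil_append, List.filter_cons]
      by_cases hany : (xs ++ [w]).any (wsMatch t) = true
      · rw [if_pos (hcond.mpr hany), hslice, hcast1]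
        rw [hrec]
        simp [hany]
      · rw [if_neg (fun hlt => hany (hcond.mp hlt)), hcast1, hrec]
        simp [hany]

-- ===== VERDICT (by name: the statement is the Claim_ definition above) =====
theorem word_sentence_spec : Claim_equal_word_sentence := by
  intro text target_word _
  unfold Spec_word_sentence word_sentence
  have h := emit_eq (PySem.Str.lower target_word) (PySem.Str.split₀ text)
    (PySem.Str.split₀ text).length (PySem.Str.split₀ text) rfl 0 [] (by simp)
  simp only [Nat.cast_zero, List.nil_append] at h
  have hB : word_sentence_alt text target_word
      = wsB_emit (PySem.Str.split₀ text)
          (wsB_prefLoop (PySem.Str.lower target_word) (PySem.Str.split₀ text) [0])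
          (wsEndsE 0 (PySem.Str.split₀ text)) 0 [] := rfl
  rw [ws_main, hB, h]
  simp
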